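-- pv_equiv track=rewrite | github.com/anchittandon-create/MuseWave_EmergentAI | backend/server_new.py | get_genre_category
-- ===== SOURCE A (Python) =====
-- from typing import List, Optional, Dict, Any
--
-- def get_genre_category(genres: List[str]) -> str:
--     """Map user genres to audio library category"""
--     genre_mapping = {
--         "electronic": ["Electronic", "House", "Techno", "Trance", "Dubstep", "EDM"],
--         "ambient": ["Ambient", "Chillwave", "Drone"],
--         "rock": ["Rock", "Metal", "Post-Rock"],
--         "hip_hop": ["Hip-Hop", "Trap", "R&B"],
--         "pop": ["Pop", "Indie Pop"],
--         "jazz": ["Jazz", "Soul"],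
--         "default": []
--     }
--
--     for category, category_genres in genre_mapping.items():
--         for genre in genres:
--             if genre in category_genres:
--                 return category
--     return "default"
-- ===== SOURCE B (Python) =====
-- # Reverse-lookup rewrite: one pass over genres collecting matched categories via a
-- # precomputed genre->category dict, then the first category in priority order wins.
-- _REV = {
--     "Electronic": "electronic", "House": "electronic", "Techno": "electronic",
--     "Trance": "electronic", "Dubstep": "electronic", "EDM": "electronic",
--     "Ambient": "ambient", "Chillwave": "ambient", "Drone": "ambient",
--     "Rock": "rock", "Metal": "rock", "Post-Rock": "rock",
--     "Hip-Hop": "hip_hop", "Trap": "hip_hop", "R&B": "hip_hop",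
--     "Pop": "pop", "Indie Pop": "pop",
--     "Jazz": "jazz", "Soul": "jazz",
-- }
-- _ORDER = ["electronic", "ambient", "rock", "hip_hop", "pop", "jazz"]
--
-- def get_genre_category(genres):
--     """Map user genres to audio library category"""
--     found = {_REV[g] for g in genres if g in _REV}
--     for category in _ORDER:
--         if category in found:
--             return category
--     return "default"
-- ===== Notes on version B (the rewrite author's own statement) =====
-- stated objective: faster
-- what changed: Replaced A's nested category-by-genre scan (each category list rescanned per input genre) with a precomputed reverse dict genre->category, one O(1)-lookup pass over the input collecting the set of matched categories, then a scan of the fixed priority order.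
import Mathlib
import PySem

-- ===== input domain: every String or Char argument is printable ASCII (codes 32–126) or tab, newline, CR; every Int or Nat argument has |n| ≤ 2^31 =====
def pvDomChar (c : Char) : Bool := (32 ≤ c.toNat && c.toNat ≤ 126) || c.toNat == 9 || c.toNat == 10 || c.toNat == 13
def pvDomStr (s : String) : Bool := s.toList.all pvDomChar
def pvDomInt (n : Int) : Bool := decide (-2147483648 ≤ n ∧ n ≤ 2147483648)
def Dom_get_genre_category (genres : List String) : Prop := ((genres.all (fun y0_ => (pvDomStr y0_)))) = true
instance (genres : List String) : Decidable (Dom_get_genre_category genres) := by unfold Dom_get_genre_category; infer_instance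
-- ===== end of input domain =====

set_option maxRecDepth 8192


-- B replaces A's nested category-by-genre scan with a precomputed reverse genre→category dict,
-- one pass over the input collecting the matched categories as a set, and a final scan of the
-- fixed category-priority order (idiomatic rewrite; same return value).

-- ===== PORT A =====
def pvMapping : List (String × List String) :=
  [("electronic", ["Electronic", "House", "Techno", "Trance", "Dubstep", "EDM"]),
   ("ambient", ["Ambient", "Chillwave", "Drone"]),
   ("rock", ["Rock", "Metal", "Post-Rock"]),
   ("hip_hop", ["Hip-Hop", "Trap", "R&B"]),
   ("pop", ["Pop", "Indie Pop"]),
   ("jazz", ["Jazz", "Soul"]),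
   ("default", [])]

-- outer loop 'for category, category_genres in genre_mapping.items()' with the early return;
-- the inner 'for genre in genres: if genre in category_genres: return category' is the .any test
def pvScanA : List (String × List String) → List String → String
  | [], _ => "default"
  | (category, category_genres) :: rest, genres =>
      if genres.any (fun g => category_genres.contains g) then category
      else pvScanA rest genres

def get_genre_category (genres : List String) : String :=
  pvScanA pvMapping genres

-- ===== PORT B =====
-- _REV
def pvRev : PySem.Dict String String := PySem.Dict.mk
  [("Electronic", "electronic"), ("House", "electronic"), ("Techno", "electronic"),
   ("Trance", "electronic"), ("Dubstep", "electronic"), ("EDM", "electronic"),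
   ("Ambient", "ambient"), ("Chillwave", "ambient"), ("Drone", "ambient"),
   ("Rock", "rock"), ("Metal", "rock"), ("Post-Rock", "rock"),
   ("Hip-Hop", "hip_hop"), ("Trap", "hip_hop"), ("R&B", "hip_hop"),
   ("Pop", "pop"), ("Indie Pop", "pop"),
   ("Jazz", "jazz"), ("Soul", "jazz")]

-- _ORDER
def pvOrder : List String := ["electronic", "ambient", "rock", "hip_hop", "pop", "jazz"]

-- found = {_REV[g] for g in genres if g in _REV}
def pvFound (genres : List String) : PySem.Set String :=
  genres.foldl (fun s g =>
    match pvRev.get? g with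
    | some c => PySem.Set.add s c
    | none => s) PySem.Set.empty

-- 'for category in _ORDER: if category in found: return category' / 'return "default"'
def pvScanB : List String → PySem.Set String → String
  | [], _ => "default"
  | category :: rest, found =>
      if PySem.Set.contains found category then category else pvScanB rest found

def get_genre_category_alt (genres : List String) : String :=
  pvScanB pvOrder (pvFound genres)

-- ===== PRECONDITION & SPEC =====
def Spec_get_genre_category (genres : List String) (out : String) : Prop := out = get_genre_category_alt genres
instance (genres : List String) (out : String) : Decidable (Spec_get_genre_category genres out) := by unfold Spec_get_genre_category; infer_instance

-- ===== CLAIM (what is proved, stated in full; the proofs are below) =====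
def Claim_equal_get_genre_category : Prop := ∀ (genres : List String), Dom_get_genre_category genres → Spec_get_genre_category genres (get_genre_category genres)

-- ===== LEMMAS AND PROOFS =====

-- the genres collected by B's fold are exactly the categories some input genre maps to
theorem pvFound_step (gs : List String) (s : PySem.Set String) (k : String) :
    k ∈ gs.foldl (fun s g =>
      match pvRev.get? g with
      | some c => PySem.Set.add s c
      | none => s) s ↔ k ∈ s ∨ ∃ g ∈ gs, pvRev.get? g = some k := by
  induction gs generalizing s with
  | nil => simp
  | cons g gs ih =>
    rw [List.foldl_cons, ih]
    cases h : pvRev.get? g with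
    | none => simp [h]
    | some c =>
      simp only [PySem.Set.mem_add, List.mem_cons]
      constructor
      · rintro (⟨hs | rfl⟩ | hex)
        · exact Or.inl hs
        · exact Or.inr ⟨g, Or.inl rfl, h⟩
        · obtain ⟨g', hg', hk⟩ := hex; exact Or.inr ⟨g', Or.inr hg', hk⟩
      · rintro (hs | ⟨g', (rfl | hg'), hk⟩)
        · exact Or.inl (Or.inl hs)
        · rw [h] at hk; exact Or.inl (Or.inr (Option.some_inj.mp hk).symm)
        · exact Or.inr ⟨g', hg', hk⟩

theorem pvFound_mem (genres : List String) (k : String) :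
    k ∈ pvFound genres ↔ ∃ g ∈ genres, pvRev.get? g = some k := by
  rw [pvFound, pvFound_step]; simp [PySem.Set.empty]

theorem pvRev_electronic (g : String) : (pvRev.get? g = some "electronic") ↔ g ∈ (["Electronic", "House", "Techno", "Trance", "Dubstep", "EDM"] : List String) := by
  by_cases h0 : g = "Electronic"
  · subst h0; decide
  by_cases h1 : g = "House"
  · subst h1; decide
  by_cases h2 : g = "Techno"
  · subst h2; decide
  by_cases h3 : g = "Trance"
  · subst h3; decide
  by_cases h4 : g = "Dubstep"
  · subst h4; decide
  by_cases h5 : g = "EDM"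
  · subst h5; decide
  by_cases h6 : g = "Ambient"
  · subst h6; decide
  by_cases h7 : g = "Chillwave"
  · subst h7; decide
  by_cases h8 : g = "Drone"
  · subst h8; decide
  by_cases h9 : g = "Rock"
  · subst h9; decide
  by_cases h10 : g = "Metal"
  · subst h10; decide
  by_cases h11 : g = "Post-Rock"
  · subst h11; decide
  by_cases h12 : g = "Hip-Hop"
  · subst h12; decide
  by_cases h13 : g = "Trap"
  · subst h13; decide
  by_cases h14 : g = "R&B"
  · subst h14; decide
  by_cases h15 : g = "Pop"
  · subst h15; decide
  by_cases h16 : g = "Indie Pop"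
  · subst h16; decide
  by_cases h17 : g = "Jazz"
  · subst h17; decide
  by_cases h18 : g = "Soul"
  · subst h18; decide
  simp only [pvRev, PySem.Dict.get?_mk_cons, beq_iff_eq]
  rw [if_neg (Ne.symm h0), if_neg (Ne.symm h1), if_neg (Ne.symm h2), if_neg (Ne.symm h3), if_neg (Ne.symm h4), if_neg (Ne.symm h5), if_neg (Ne.symm h6), if_neg (Ne.symm h7), if_neg (Ne.symm h8), if_neg (Ne.symm h9), if_neg (Ne.symm h10), if_neg (Ne.symm h11), if_neg (Ne.symm h12), if_neg (Ne.symm h13), if_neg (Ne.symm h14), if_neg (Ne.symm h15), if_neg (Ne.symm h16), if_neg (Ne.symm h17), if_neg (Ne.symm h18)]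
  simp [PySem.Dict.get?, h0, h1, h2, h3, h4, h5]

theorem pvRev_ambient (g : String) : (pvRev.get? g = some "ambient") ↔ g ∈ (["Ambient", "Chillwave", "Drone"] : List String) := by
  by_cases h0 : g = "Electronic"
  · subst h0; decide
  by_cases h1 : g = "House"
  · subst h1; decide
  by_cases h2 : g = "Techno"
  · subst h2; decide
  by_cases h3 : g = "Trance"
  · subst h3; decide
  by_cases h4 : g = "Dubstep"
  · subst h4; decide
  by_cases h5 : g = "EDM"
  · subst h5; decide
  by_cases h6 : g = "Ambient"
  · subst h6; decide
  by_cases h7 : g = "Chillwave"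
  · subst h7; decide
  by_cases h8 : g = "Drone"
  · subst h8; decide
  by_cases h9 : g = "Rock"
  · subst h9; decide
  by_cases h10 : g = "Metal"
  · subst h10; decide
  by_cases h11 : g = "Post-Rock"
  · subst h11; decide
  by_cases h12 : g = "Hip-Hop"
  · subst h12; decide
  by_cases h13 : g = "Trap"
  · subst h13; decide
  by_cases h14 : g = "R&B"
  · subst h14; decide
  by_cases h15 : g = "Pop"
  · subst h15; decide
  by_cases h16 : g = "Indie Pop"
  · subst h16; decide
  by_cases h17 : g = "Jazz"
  · subst h17; decide
  by_cases h18 : g = "Soul"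
  · subst h18; decide
  simp only [pvRev, PySem.Dict.get?_mk_cons, beq_iff_eq]
  rw [if_neg (Ne.symm h0), if_neg (Ne.symm h1), if_neg (Ne.symm h2), if_neg (Ne.symm h3), if_neg (Ne.symm h4), if_neg (Ne.symm h5), if_neg (Ne.symm h6), if_neg (Ne.symm h7), if_neg (Ne.symm h8), if_neg (Ne.symm h9), if_neg (Ne.symm h10), if_neg (Ne.symm h11), if_neg (Ne.symm h12), if_neg (Ne.symm h13), if_neg (Ne.symm h14), if_neg (Ne.symm h15), if_neg (Ne.symm h16), if_neg (Ne.symm h17), if_neg (Ne.symm h18)]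
  simp [PySem.Dict.get?, h6, h7, h8]

theorem pvRev_rock (g : String) : (pvRev.get? g = some "rock") ↔ g ∈ (["Rock", "Metal", "Post-Rock"] : List String) := by
  by_cases h0 : g = "Electronic"
  · subst h0; decide
  by_cases h1 : g = "House"
  · subst h1; decide
  by_cases h2 : g = "Techno"
  · subst h2; decide
  by_cases h3 : g = "Trance"
  · subst h3; decide
  by_cases h4 : g = "Dubstep"
  · subst h4; decide
  by_cases h5 : g = "EDM"
  · subst h5; decide
  by_cases h6 : g = "Ambient"
  · subst h6; decide
  by_cases h7 : g = "Chillwave"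
  · subst h7; decide
  by_cases h8 : g = "Drone"
  · subst h8; decide
  by_cases h9 : g = "Rock"
  · subst h9; decide
  by_cases h10 : g = "Metal"
  · subst h10; decide
  by_cases h11 : g = "Post-Rock"
  · subst h11; decide
  by_cases h12 : g = "Hip-Hop"
  · subst h12; decide
  by_cases h13 : g = "Trap"
  · subst h13; decide
  by_cases h14 : g = "R&B"
  · subst h14; decide
  by_cases h15 : g = "Pop"
  · subst h15; decide
  by_cases h16 : g = "Indie Pop"
  · subst h16; decide
  by_cases h17 : g = "Jazz"
  · subst h17; decide
  by_cases h18 : g = "Soul"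
  · subst h18; decide
  simp only [pvRev, PySem.Dict.get?_mk_cons, beq_iff_eq]
  rw [if_neg (Ne.symm h0), if_neg (Ne.symm h1), if_neg (Ne.symm h2), if_neg (Ne.symm h3), if_neg (Ne.symm h4), if_neg (Ne.symm h5), if_neg (Ne.symm h6), if_neg (Ne.symm h7), if_neg (Ne.symm h8), if_neg (Ne.symm h9), if_neg (Ne.symm h10), if_neg (Ne.symm h11), if_neg (Ne.symm h12), if_neg (Ne.symm h13), if_neg (Ne.symm h14), if_neg (Ne.symm h15), if_neg (Ne.symm h16), if_neg (Ne.symm h17), if_neg (Ne.symm h18)]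
  simp [PySem.Dict.get?, h9, h10, h11]

theorem pvRev_hip_hop (g : String) : (pvRev.get? g = some "hip_hop") ↔ g ∈ (["Hip-Hop", "Trap", "R&B"] : List String) := by
  by_cases h0 : g = "Electronic"
  · subst h0; decide
  by_cases h1 : g = "House"
  · subst h1; decide
  by_cases h2 : g = "Techno"
  · subst h2; decide
  by_cases h3 : g = "Trance"
  · subst h3; decide
  by_cases h4 : g = "Dubstep"
  · subst h4; decide
  by_cases h5 : g = "EDM"
  · subst h5; decide
  by_cases h6 : g = "Ambient"
  · subst h6; decide
  by_cases h7 : g = "Chillwave"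
  · subst h7; decide
  by_cases h8 : g = "Drone"
  · subst h8; decide
  by_cases h9 : g = "Rock"
  · subst h9; decide
  by_cases h10 : g = "Metal"
  · subst h10; decide
  by_cases h11 : g = "Post-Rock"
  · subst h11; decide
  by_cases h12 : g = "Hip-Hop"
  · subst h12; decide
  by_cases h13 : g = "Trap"
  · subst h13; decide
  by_cases h14 : g = "R&B"
  · subst h14; decide
  by_cases h15 : g = "Pop"
  · subst h15; decide
  by_cases h16 : g = "Indie Pop"
  · subst h16; decide
  by_cases h17 : g = "Jazz"
  · subst h17; decide
  by_cases h18 : g = "Soul"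
  · subst h18; decide
  simp only [pvRev, PySem.Dict.get?_mk_cons, beq_iff_eq]
  rw [if_neg (Ne.symm h0), if_neg (Ne.symm h1), if_neg (Ne.symm h2), if_neg (Ne.symm h3), if_neg (Ne.symm h4), if_neg (Ne.symm h5), if_neg (Ne.symm h6), if_neg (Ne.symm h7), if_neg (Ne.symm h8), if_neg (Ne.symm h9), if_neg (Ne.symm h10), if_neg (Ne.symm h11), if_neg (Ne.symm h12), if_neg (Ne.symm h13), if_neg (Ne.symm h14), if_neg (Ne.symm h15), if_neg (Ne.symm h16), if_neg (Ne.symm h17), if_neg (Ne.symm h18)]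
  simp [PySem.Dict.get?, h12, h13, h14]

theorem pvRev_pop (g : String) : (pvRev.get? g = some "pop") ↔ g ∈ (["Pop", "Indie Pop"] : List String) := by
  by_cases h0 : g = "Electronic"
  · subst h0; decide
  by_cases h1 : g = "House"
  · subst h1; decide
  by_cases h2 : g = "Techno"
  · subst h2; decide
  by_cases h3 : g = "Trance"
  · subst h3; decide
  by_cases h4 : g = "Dubstep"
  · subst h4; decide
  by_cases h5 : g = "EDM"
  · subst h5; decide
  by_cases h6 : g = "Ambient"
  · subst h6; decide
  by_cases h7 : g = "Chillwave"
  · subst h7; decide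
  by_cases h8 : g = "Drone"
  · subst h8; decide
  by_cases h9 : g = "Rock"
  · subst h9; decide
  by_cases h10 : g = "Metal"
  · subst h10; decide
  by_cases h11 : g = "Post-Rock"
  · subst h11; decide
  by_cases h12 : g = "Hip-Hop"
  · subst h12; decide
  by_cases h13 : g = "Trap"
  · subst h13; decide
  by_cases h14 : g = "R&B"
  · subst h14; decide
  by_cases h15 : g = "Pop"
  · subst h15; decide
  by_cases h16 : g = "Indie Pop"
  · subst h16; decide
  by_cases h17 : g = "Jazz"
  · subst h17; decide
  by_cases h18 : g = "Soul"
  · subst h18; decide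
  simp only [pvRev, PySem.Dict.get?_mk_cons, beq_iff_eq]
  rw [if_neg (Ne.symm h0), if_neg (Ne.symm h1), if_neg (Ne.symm h2), if_neg (Ne.symm h3), if_neg (Ne.symm h4), if_neg (Ne.symm h5), if_neg (Ne.symm h6), if_neg (Ne.symm h7), if_neg (Ne.symm h8), if_neg (Ne.symm h9), if_neg (Ne.symm h10), if_neg (Ne.symm h11), if_neg (Ne.symm h12), if_neg (Ne.symm h13), if_neg (Ne.symm h14), if_neg (Ne.symm h15), if_neg (Ne.symm h16), if_neg (Ne.symm h17), if_neg (Ne.symm h18)]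
  simp [PySem.Dict.get?, h15, h16]

theorem pvRev_jazz (g : String) : (pvRev.get? g = some "jazz") ↔ g ∈ (["Jazz", "Soul"] : List String) := by
  by_cases h0 : g = "Electronic"
  · subst h0; decide
  by_cases h1 : g = "House"
  · subst h1; decide
  by_cases h2 : g = "Techno"
  · subst h2; decide
  by_cases h3 : g = "Trance"
  · subst h3; decide
  by_cases h4 : g = "Dubstep"
  · subst h4; decide
  by_cases h5 : g = "EDM"
  · subst h5; decide
  by_cases h6 : g = "Ambient"
  · subst h6; decide
  by_cases h7 : g = "Chillwave"
  · subst h7; decide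
  by_cases h8 : g = "Drone"
  · subst h8; decide
  by_cases h9 : g = "Rock"
  · subst h9; decide
  by_cases h10 : g = "Metal"
  · subst h10; decide
  by_cases h11 : g = "Post-Rock"
  · subst h11; decide
  by_cases h12 : g = "Hip-Hop"
  · subst h12; decide
  by_cases h13 : g = "Trap"
  · subst h13; decide
  by_cases h14 : g = "R&B"
  · subst h14; decide
  by_cases h15 : g = "Pop"
  · subst h15; decide
  by_cases h16 : g = "Indie Pop"
  · subst h16; decide
  by_cases h17 : g = "Jazz"
  · subst h17; decide
  by_cases h18 : g = "Soul"
  · subst h18; decide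
  simp only [pvRev, PySem.Dict.get?_mk_cons, beq_iff_eq]
  rw [if_neg (Ne.symm h0), if_neg (Ne.symm h1), if_neg (Ne.symm h2), if_neg (Ne.symm h3), if_neg (Ne.symm h4), if_neg (Ne.symm h5), if_neg (Ne.symm h6), if_neg (Ne.symm h7), if_neg (Ne.symm h8), if_neg (Ne.symm h9), if_neg (Ne.symm h10), if_neg (Ne.symm h11), if_neg (Ne.symm h12), if_neg (Ne.symm h13), if_neg (Ne.symm h14), if_neg (Ne.symm h15), if_neg (Ne.symm h16), if_neg (Ne.symm h17), if_neg (Ne.symm h18)]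
  simp [PySem.Dict.get?, h17, h18]

-- B's membership test for a category equals A's 'some input genre is in that category's list'
theorem pvCond (genres : List String) (k : String) (L : List String)
    (h : ∀ g, (pvRev.get? g = some k) ↔ g ∈ L) :
    PySem.Set.contains (pvFound genres) k = genres.any (fun g => L.contains g) := by
  rw [Bool.eq_iff_iff]
  simp only [PySem.Set.contains, List.contains_eq_mem, decide_eq_true_eq, List.any_eq_true,
    pvFound_mem]
  constructor
  · rintro ⟨g, hg, hk⟩; exact ⟨g, hg, by simpa using (h g).mp hk⟩
  · rintro ⟨g, hg, hL⟩; exact ⟨g, hg, (h g).mpr (by simpa using hL)⟩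

-- ===== VERDICT (by name: the statement is the Claim_ definition above) =====
theorem get_genre_category_spec : Claim_equal_get_genre_category := by
  intro genres _
  unfold Spec_get_genre_category get_genre_category get_genre_category_alt
  simp only [pvMapping, pvOrder, pvScanA, pvScanB]
  rw [pvCond genres _ _ pvRev_electronic, pvCond genres _ _ pvRev_ambient,
    pvCond genres _ _ pvRev_rock, pvCond genres _ _ pvRev_hip_hop,
    pvCond genres _ _ pvRev_pop, pvCond genres _ _ pvRev_jazz]
  simp
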